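-- pv_equiv track=rewrite | github.com/Raafay7/Glamora-AI-Fashion-Recommendation | accounts/views.py | encode_user_profile
-- ===== SOURCE A (Python) =====
-- def encode_user_profile(profile_dict):
--     """One-hot encode user profile"""
--     encoded = {}
--
--     categories = {
--         'body_shape': ['Triangle', 'Rectangle', 'Hourglass', 'Oval'],
--         'clothing_type': ['Social', 'Casual', 'Workwear', 'Maternity'],
--         'skin_tone': ['Wheatish', 'Tan', 'Brown', 'Light'],
--         'location_tag': ['Home', 'Outdoor', 'Office', 'Restaurant', 'University', 'Mall', 'Beach', 'Garden'],
--         'occasion_tag': ['Dinner', 'Wedding', 'Date Night', 'Formal Event', 'Interview', 'Party', 'Work', 'Casual Outing'],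
--         'seasonal_tag': ['Summer', 'Winter', 'Spring', 'Fall', 'Festive', 'Monsoon'],
--     }
--
--     for category, options in categories.items():
--         for option in options:
--             key = f"{category}_{option.replace(' ', '_')}"
--             encoded[key] = 1 if profile_dict.get(category) == option else 0
--
--     return encoded
-- ===== SOURCE B (Python) =====
-- _CATEGORIES = [
--     ('body_shape', ['Triangle', 'Rectangle', 'Hourglass', 'Oval']),
--     ('clothing_type', ['Social', 'Casual', 'Workwear', 'Maternity']),
--     ('skin_tone', ['Wheatish', 'Tan', 'Brown', 'Light']),
--     ('location_tag', ['Home', 'Outdoor', 'Office', 'Restaurant', 'University', 'Mall', 'Beach', 'Garden']),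
--     ('occasion_tag', ['Dinner', 'Wedding', 'Date Night', 'Formal Event', 'Interview', 'Party', 'Work', 'Casual Outing']),
--     ('seasonal_tag', ['Summer', 'Winter', 'Spring', 'Fall', 'Festive', 'Monsoon']),
-- ]
--
-- # the output's key set is fixed: precompute it once, flattened, at module level
-- _ALL_KEYS = [f"{cat}_{opt.replace(' ', '_')}" for cat, opts in _CATEGORIES for opt in opts]
--
--
-- def encode_user_profile(profile_dict):
--     """One-hot encode user profile"""
--     # stage 1: collect the set of active keys (at most one per category)
--     active = set()
--     for cat, opts in _CATEGORIES:
--         val = profile_dict.get(cat)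
--         if val in opts:
--             active.add(f"{cat}_{val.replace(' ', '_')}")
--     # stage 2: one comprehension over the precomputed flat key list
--     return {key: (1 if key in active else 0) for key in _ALL_KEYS}
-- ===== Notes on version B (the rewrite author's own statement) =====
-- stated objective: alternative
-- what changed: B precomputes the flat list of all 34 output keys at module level and replaces A's nested loops with per-option equality tests by two staged passes: first build the set of active keys (one membership-guarded lookup per category), then a single comprehension over the precomputed key list emitting 1 for keys in the active set and 0 otherwise.
import Mathlib
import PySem

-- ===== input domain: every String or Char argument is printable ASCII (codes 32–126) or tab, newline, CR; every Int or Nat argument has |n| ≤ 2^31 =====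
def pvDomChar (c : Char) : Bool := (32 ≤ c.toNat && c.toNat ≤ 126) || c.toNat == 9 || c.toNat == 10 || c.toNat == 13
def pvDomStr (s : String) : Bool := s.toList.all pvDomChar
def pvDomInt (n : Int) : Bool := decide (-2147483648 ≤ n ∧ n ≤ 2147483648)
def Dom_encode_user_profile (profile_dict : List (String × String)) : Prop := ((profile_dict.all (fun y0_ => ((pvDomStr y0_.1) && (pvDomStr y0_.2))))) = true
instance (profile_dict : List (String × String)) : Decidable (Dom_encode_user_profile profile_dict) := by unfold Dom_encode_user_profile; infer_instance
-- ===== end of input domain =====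

-- B precomputes the flat list of all 34 output keys and replaces A's nested per-option
-- comparison loops by two staged passes (build the active-key set, then one sweep over the
-- precomputed key list); same cost, a genuinely different decomposition.

-- shared constant table and the key formatter f"{cat}_{opt.replace(' ','_')}"
def pvCategories : List (String × List String) :=
  [("body_shape", ["Triangle", "Rectangle", "Hourglass", "Oval"]),
   ("clothing_type", ["Social", "Casual", "Workwear", "Maternity"]),
   ("skin_tone", ["Wheatish", "Tan", "Brown", "Light"]),
   ("location_tag", ["Home", "Outdoor", "Office", "Restaurant", "University", "Mall", "Beach", "Garden"]),
   ("occasion_tag", ["Dinner", "Wedding", "Date Night", "Formal Event", "Interview", "Party", "Work", "Casual Outing"]),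
   ("seasonal_tag", ["Summer", "Winter", "Spring", "Fall", "Festive", "Monsoon"])]

def pvKey (cat opt : String) : String := cat ++ "_" ++ PySem.Str.replace opt " " "_"

-- ===== PORT A =====
-- A's outer-loop body: for each option, write 1 or 0 by comparing profile_dict.get(category)
def pvBlockA (profile_dict : List (String × String)) (enc : PySem.Dict String Int)
    (co : String × List String) : PySem.Dict String Int :=
  co.2.foldl (fun enc opt =>
    enc.insert (pvKey co.1 opt) (if profile_dict.lookup co.1 = some opt then 1 else 0)) enc

def encode_user_profile (profile_dict : List (String × String)) : List (String × Int) :=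
  (pvCategories.foldl (pvBlockA profile_dict) PySem.Dict.empty).items

-- ===== PORT B =====
-- B's module-level _ALL_KEYS: the flat list of every output key, in order
def pvAllKeys : List String := pvCategories.flatMap (fun co => co.2.map (pvKey co.1))

-- B's stage 1: the set of active keys (at most one per category)
def pvActive (profile_dict : List (String × String)) : PySem.Set String :=
  pvCategories.foldl (fun s co =>
    match profile_dict.lookup co.1 with
    | some v => if v ∈ co.2 then PySem.Set.add s (pvKey co.1 v) else s
    | none => s) PySem.Set.empty

-- B's stage 2: one sweep over the precomputed key list, 1 iff the key is active
def encode_user_profile_alt (profile_dict : List (String × String)) : List (String × Int) :=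
  let active := pvActive profile_dict
  (pvAllKeys.foldl (fun d k => d.insert k (if k ∈ active then (1 : Int) else 0))
    PySem.Dict.empty).items

-- ===== PRECONDITION & SPEC =====
def Spec_encode_user_profile (profile_dict : List (String × String)) (out : List (String × Int)) : Prop := out = encode_user_profile_alt profile_dict
instance (profile_dict : List (String × String)) (out : List (String × Int)) : Decidable (Spec_encode_user_profile profile_dict out) := by unfold Spec_encode_user_profile; infer_instance

-- ===== CLAIM (what is proved, stated in full; the proofs are below) =====
def Claim_equal_encode_user_profile : Prop := ∀ (profile_dict : List (String × String)), Dom_encode_user_profile profile_dict → Spec_encode_user_profile profile_dict (encode_user_profile profile_dict)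

-- ===== LEMMAS AND PROOFS =====

-- the flat list of (category, option) pairs, for stating global key injectivity
def pvPairs : List (String × String) :=
  pvCategories.flatMap (fun co => co.2.map (fun o => (co.1, o)))

-- the 34 output keys are pairwise distinct
theorem pvKeys_nodup : (pvPairs.map (fun p => pvKey p.1 p.2)).Nodup := by decide

-- hence (cat, opt) ↦ key is injective on the table
theorem pvKey_inj {p q : String × String} (hp : p ∈ pvPairs) (hq : q ∈ pvPairs)
    (h : pvKey p.1 p.2 = pvKey q.1 q.2) : p = q :=
  List.inj_on_of_nodup_map pvKeys_nodup hp hq h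

-- membership in the active-set fold, over any prefix state
theorem pvMem_active_fold (pd : List (String × String)) (cs : List (String × List String))
    (s : PySem.Set String) (k : String) :
    (k ∈ cs.foldl (fun s co =>
      match pd.lookup co.1 with
      | some v => if v ∈ co.2 then PySem.Set.add s (pvKey co.1 v) else s
      | none => s) s) ↔
    k ∈ s ∨ ∃ co ∈ cs, ∃ v, pd.lookup co.1 = some v ∧ v ∈ co.2 ∧ k = pvKey co.1 v := by
  induction cs generalizing s with
  | nil => simp
  | cons c t ih =>
      simp only [List.foldl_cons, List.mem_cons]
      rw [ih]
      cases hl : pd.lookup c.1 with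
      | none =>
          constructor
          · rintro (h | ⟨co, hco, v, h1, h2, h3⟩)
            · exact Or.inl h
            · exact Or.inr ⟨co, Or.inr hco, v, h1, h2, h3⟩
          · rintro (h | ⟨co, (rfl | hco), v, h1, h2, h3⟩)
            · exact Or.inl h
            · rw [hl] at h1; cases h1
            · exact Or.inr ⟨co, hco, v, h1, h2, h3⟩
      | some v =>
          by_cases hv : v ∈ c.2
          · simp only [hv, if_pos]
            rw [PySem.Set.mem_add s (pvKey c.1 v) k]
            constructor
            · rintro ((h | h) | ⟨co, hco, w, h1, h2, h3⟩)
              · exact Or.inl h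
              · exact Or.inr ⟨c, Or.inl rfl, v, hl, hv, h⟩
              · exact Or.inr ⟨co, Or.inr hco, w, h1, h2, h3⟩
            · rintro (h | ⟨co, (rfl | hco), w, h1, h2, h3⟩)
              · exact Or.inl (Or.inl h)
              · rw [hl] at h1; cases h1; exact Or.inl (Or.inr h3)
              · exact Or.inr ⟨co, hco, w, h1, h2, h3⟩
          · simp only [hv, if_neg, not_false_iff]
            constructor
            · rintro (h | ⟨co, hco, w, h1, h2, h3⟩)
              · exact Or.inl h
              · exact Or.inr ⟨co, Or.inr hco, w, h1, h2, h3⟩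
            · rintro (h | ⟨co, (rfl | hco), w, h1, h2, h3⟩)
              · exact Or.inl h
              · rw [hl] at h1; cases h1; exact absurd h2 hv
              · exact Or.inr ⟨co, hco, w, h1, h2, h3⟩

-- the key of a table pair is active iff the profile maps its category to its option
theorem pvBit_eq (pd : List (String × String)) {cat opt : String}
    (hmem : (cat, opt) ∈ pvPairs) :
    (pvKey cat opt ∈ pvActive pd) ↔ pd.lookup cat = some opt := by
  unfold pvActive
  rw [pvMem_active_fold]
  constructor
  · rintro (h | ⟨co, hco, v, h1, h2, h3⟩)
    · cases h
    · have hq : (co.1, v) ∈ pvPairs := by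
        unfold pvPairs
        rw [List.mem_flatMap]
        exact ⟨co, hco, List.mem_map.mpr ⟨v, h2, rfl⟩⟩
      have := pvKey_inj hmem hq h3
      rw [Prod.ext_iff] at this
      obtain ⟨h4, h5⟩ := this
      simp only at h4 h5
      rw [h4, h5]; exact h1
  · intro hl
    unfold pvPairs at hmem
    rw [List.mem_flatMap] at hmem
    obtain ⟨co, hco, hmm⟩ := hmem
    rw [List.mem_map] at hmm
    obtain ⟨o, ho, heq⟩ := hmm
    have h1 : cat = co.1 := (Prod.ext_iff.mp heq.symm).1
    have h2 : opt = o := (Prod.ext_iff.mp heq.symm).2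
    subst h1; subst h2
    exact Or.inr ⟨co, hco, opt, hl, ho, rfl⟩

-- keys of an A-block are the previous keys updated with the category's key list
theorem pvKeys_blockA (pd : List (String × String)) (d : PySem.Dict String Int)
    (co : String × List String) :
    (pvBlockA pd d co).keys = PySem.Set.update d.keys (co.2.map (pvKey co.1)) := by
  unfold pvBlockA
  exact PySem.Dict.keys_foldl_insert_key co.2 (pvKey co.1)
    (fun _ opt => if pd.lookup co.1 = some opt then 1 else 0) d

-- items of an A-block over fresh distinct keys: the one-hot row is appended
theorem pvItems_blockA (pd : List (String × String)) (d : PySem.Dict String Int)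
    (co : String × List String)
    (hnd : (co.2.map (pvKey co.1)).Nodup)
    (hfresh : ∀ o ∈ co.2, d.contains (pvKey co.1 o) = false) :
    (pvBlockA pd d co).items
      = d.items ++ co.2.map (fun o => (pvKey co.1 o,
          if pd.lookup co.1 = some o then (1 : Int) else 0)) :=
  PySem.Dict.items_foldl_insert_fresh co.2 (pvKey co.1) _ d hfresh hnd


-- one category's one-hot row equals B's sweep restricted to that category's keys
theorem pvSeg_eq (pd : List (String × String)) (cat : String) (opts : List String)
    (h : ∀ o ∈ opts, (cat, o) ∈ pvPairs) :
    (opts.map (pvKey cat)).map (fun k => (k, if k ∈ pvActive pd then (1 : Int) else 0))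
      = opts.map (fun o => (pvKey cat o, if pd.lookup cat = some o then (1 : Int) else 0)) := by
  rw [List.map_map]
  apply List.map_congr_left
  intro o ho
  have hb := pvBit_eq pd (h o ho)
  by_cases hc : pd.lookup cat = some o
  · simp [Function.comp, hc, hb.mpr hc]
  · have hn : pvKey cat o ∉ pvActive pd := fun hx => hc (hb.mp hx)
    simp [Function.comp, hc, hn]

-- ===== VERDICT (by name: the statement is the Claim_ definition above) =====
set_option maxRecDepth 8192 in
set_option maxHeartbeats 2000000 in
theorem encode_user_profile_spec : Claim_equal_encode_user_profile := by
  intro pd _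
  unfold Spec_encode_user_profile encode_user_profile encode_user_profile_alt
  -- B's dict: all 34 keys fresh and distinct, so items = the flat map over pvAllKeys
  have hB : (pvAllKeys.foldl
        (fun d k => d.insert k (if k ∈ pvActive pd then (1 : Int) else 0))
        PySem.Dict.empty).items
      = pvAllKeys.map (fun k => (k, if k ∈ pvActive pd then (1 : Int) else 0)) := by
    have := PySem.Dict.items_foldl_insert_fresh pvAllKeys (fun k => k)
      (fun k => if k ∈ pvActive pd then (1 : Int) else 0) PySem.Dict.empty
      (by intro a _; simp [PySem.Dict.contains_empty])
      (by decide)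
    simpa using this
  rw [hB]
  -- A's dict: unfold the six category blocks, each appending its one-hot row
  simp only [pvCategories, List.foldl_cons, List.foldl_nil]
  rw [pvItems_blockA pd _ ("seasonal_tag", ["Summer", "Winter", "Spring", "Fall", "Festive", "Monsoon"]) (by decide)
    (by intro o ho
        simp only [PySem.Dict.contains_eq_decide_mem_keys, pvKeys_blockA, PySem.Dict.keys_empty]
        fin_cases ho <;> decide)]
  rw [pvItems_blockA pd _ ("occasion_tag", ["Dinner", "Wedding", "Date Night", "Formal Event", "Interview", "Party", "Work", "Casual Outing"]) (by decide)
    (by intro o ho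
        simp only [PySem.Dict.contains_eq_decide_mem_keys, pvKeys_blockA, PySem.Dict.keys_empty]
        fin_cases ho <;> decide)]
  rw [pvItems_blockA pd _ ("location_tag", ["Home", "Outdoor", "Office", "Restaurant", "University", "Mall", "Beach", "Garden"]) (by decide)
    (by intro o ho
        simp only [PySem.Dict.contains_eq_decide_mem_keys, pvKeys_blockA, PySem.Dict.keys_empty]
        fin_cases ho <;> decide)]
  rw [pvItems_blockA pd _ ("skin_tone", ["Wheatish", "Tan", "Brown", "Light"]) (by decide)
    (by intro o ho
        simp only [PySem.Dict.contains_eq_decide_mem_keys, pvKeys_blockA, PySem.Dict.keys_empty]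
        fin_cases ho <;> decide)]
  rw [pvItems_blockA pd _ ("clothing_type", ["Social", "Casual", "Workwear", "Maternity"]) (by decide)
    (by intro o ho
        simp only [PySem.Dict.contains_eq_decide_mem_keys, pvKeys_blockA, PySem.Dict.keys_empty]
        fin_cases ho <;> decide)]
  rw [pvItems_blockA pd PySem.Dict.empty ("body_shape", ["Triangle", "Rectangle", "Hourglass", "Oval"]) (by decide)
    (by intro o _; simp [PySem.Dict.contains_empty])]
  -- both sides are now the same six concatenated segments
  simp only [pvAllKeys, pvCategories, List.flatMap_cons, List.flatMap_nil,
    List.append_nil, List.map_append,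
    show (PySem.Dict.empty : PySem.Dict String Int).items = ([] : List (String × Int)) from rfl,
    List.nil_append, List.append_assoc]
  rw [pvSeg_eq pd "body_shape" ["Triangle", "Rectangle", "Hourglass", "Oval"] (by decide)]
  rw [pvSeg_eq pd "clothing_type" ["Social", "Casual", "Workwear", "Maternity"] (by decide)]
  rw [pvSeg_eq pd "skin_tone" ["Wheatish", "Tan", "Brown", "Light"] (by decide)]
  rw [pvSeg_eq pd "location_tag" ["Home", "Outdoor", "Office", "Restaurant", "University", "Mall", "Beach", "Garden"] (by decide)]
  rw [pvSeg_eq pd "occasion_tag" ["Dinner", "Wedding", "Date Night", "Formal Event", "Interview", "Party", "Work", "Casual Outing"] (by decide)]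
  rw [pvSeg_eq pd "seasonal_tag" ["Summer", "Winter", "Spring", "Fall", "Festive", "Monsoon"] (by decide)]
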